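-- pv_equiv track=rewrite | github.com/WuTheFWasThat/send-a-damned-message | send_a_damned_message.py | extend_sequences
-- ===== SOURCE A (Python) =====
-- def _rotate_alphabet(x, direction):
--     is_upper = x == x.upper()
--     val = ord(x.lower()) - ord('a')
--     newval = (val + direction) % 26
--     new_x = chr(newval + ord('a'))
--     if is_upper:
--         new_x = new_x.upper()
--     return new_x
--
-- def extend_sequences(x):
--     prev = None
--     direction = None
--     result = []
--     for char in x + ' ':
--         cur = char
--         if prev is not None:
--             new_direction = None
--             if direction is not None:
--                 target = _rotate_alphabet(prev, direction)
--                 if cur != target: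
--                     result.append(target)
--                     new_direction = None
--                 else:
--                     new_direction = direction
--             if cur == _rotate_alphabet(prev, 1):
--                 new_direction = 1
--             elif cur == _rotate_alphabet(prev, -1):
--                 new_direction = -1
--             elif cur == prev:
--                 new_direction = 0
--             if direction is None and new_direction is None:
--                 result.append(prev)
--             direction = new_direction
--         prev = cur
--     return ''.join(result)
-- ===== SOURCE B (Python) =====
-- def _rotate_alphabet(x, direction):
--     is_upper = x == x.upper()
--     val = ord(x.lower()) - ord('a')
--     newval = (val + direction) % 26
--     new_x = chr(newval + ord('a'))
--     if is_upper:
--         new_x = new_x.upper()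
--     return new_x
--
--
-- def _pair_step(prev, cur):
--     if cur == _rotate_alphabet(prev, 1):
--         return 1
--     if cur == _rotate_alphabet(prev, -1):
--         return -1
--     if cur == prev:
--         return 0
--     return None
--
--
-- def extend_sequences(x):
--     s = x + ' '
--     n = len(s)
--     out = []
--     i = 0
--     fresh = True  # s[i] is not the tail of an already-emitted run
--     while i + 1 < n:
--         step = _pair_step(s[i], s[i + 1])
--         if step is None:
--             if fresh:
--                 out.append(s[i])
--             i += 1
--             fresh = True
--         else:
--             j = i + 1
--             while j + 1 < n and s[j + 1] == _rotate_alphabet(s[j], step):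
--                 j += 1
--             if j + 1 < n:
--                 out.append(_rotate_alphabet(s[j], step))
--             i = j
--             fresh = False
--     return ''.join(out)
-- ===== Notes on version B (the rewrite author's own statement) =====
-- stated objective: alternative
-- what changed: Replaced A's single fold carrying prev/direction/result state with explicit greedy run segmentation: an index loop classifies each pair once, an inner scan extends the maximal run, emitting one extrapolated character per run (or the character itself for a lone fresh character) with a one-character overlap between runs.
import Mathlib
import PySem

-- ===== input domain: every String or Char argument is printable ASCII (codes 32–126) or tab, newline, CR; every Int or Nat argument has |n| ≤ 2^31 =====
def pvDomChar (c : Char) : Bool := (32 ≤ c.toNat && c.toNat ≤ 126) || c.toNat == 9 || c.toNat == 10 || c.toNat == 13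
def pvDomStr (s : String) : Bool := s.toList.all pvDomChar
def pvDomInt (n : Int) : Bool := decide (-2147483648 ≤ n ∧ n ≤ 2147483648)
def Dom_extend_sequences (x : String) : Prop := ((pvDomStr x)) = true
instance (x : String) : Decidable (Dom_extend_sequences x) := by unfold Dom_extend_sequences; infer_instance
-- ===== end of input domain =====

-- B replaces A's stateful fold (prev/direction/result) by explicit greedy run segmentation
-- with the same helper; objective: alternative decomposition (no speed claim).

-- ===== PORT A =====

-- _rotate_alphabet; chr is exact here since newval + ord('a') is always in 97..122
def rotate_alphabet (x : Char) (direction : Int) : Char :=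
  let is_upper := x = PySem.Chars.upperChar x
  let val : Int := ((PySem.Chars.lowerChar x).toNat : Int) - ('a'.toNat : Int)
  let newval := PySem.Int.mod (val + direction) 26
  let new_x := Char.ofNat (newval + ('a'.toNat : Int)).toNat
  if is_upper then PySem.Chars.upperChar new_x else new_x

-- one iteration of A's for-loop; state = (prev, direction, result)
def esStep (st : Option Char × Option Int × List Char) (char : Char) :
    Option Char × Option Int × List Char :=
  let cur := char
  match st with
  | (none, direction, result) => (some cur, direction, result)
  | (some prev, direction, result) =>
    let ndr : Option Int × List Char :=
      match direction with
      | none => (none, result)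
      | some d =>
        let target := rotate_alphabet prev d
        if cur ≠ target then (none, result ++ [target]) else (some d, result)
    let nd : Option Int :=
      if cur = rotate_alphabet prev 1 then some 1
      else if cur = rotate_alphabet prev (-1) then some (-1)
      else if cur = prev then some 0
      else ndr.1
    let result2 := if direction = none ∧ nd = none then ndr.2 ++ [prev] else ndr.2
    (some cur, nd, result2)

def extend_sequences (x : String) : String :=
  String.ofList (((x.toList ++ [' ']).foldl esStep (none, none, [])).2.2)

-- ===== PORT B =====

-- _pair_step
def pairStep (prev cur : Char) : Option Int :=
  if cur = rotate_alphabet prev 1 then some 1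
  else if cur = rotate_alphabet prev (-1) then some (-1)
  else if cur = prev then some 0
  else none

-- the inner while-loop extending a run; returns (last char of run, remaining chars)
def runEnd (step : Int) (p : Char) : List Char → Char × List Char
  | [] => (p, [])
  | c :: rest => if c = rotate_alphabet p step then runEnd step c rest else (p, c :: rest)

theorem runEnd_len (step : Int) (p : Char) (l : List Char) :
    (runEnd step p l).2.length ≤ l.length := by
  induction l generalizing p with
  | nil => simp [runEnd]
  | cons c rest ih =>
    simp only [runEnd]
    split
    · exact le_trans (ih c) (by simp)
    · simp

-- the outer while-loop; the list is s[i:], fresh = s[i] is not the tail of an emitted run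
def altGo : List Char → Bool → List Char
  | [], _ => []
  | [_], _ => []
  | p :: c :: rest, fresh =>
    match pairStep p c with
    | none => (if fresh then [p] else []) ++ altGo (c :: rest) true
    | some step =>
      let r := runEnd step c rest
      if r.2 = [] then [] else rotate_alphabet r.1 step :: altGo (r.1 :: r.2) false
  termination_by l _ => l.length
  decreasing_by
  · simp
  · have := runEnd_len step c rest; simp at *; omega

def extend_sequences_alt (x : String) : String :=
  String.ofList (altGo (x.toList ++ [' ']) true)

-- ===== PRECONDITION & SPEC =====
def Spec_extend_sequences (x : String) (out : String) : Prop := out = extend_sequences_alt x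
instance (x : String) (out : String) : Decidable (Spec_extend_sequences x out) := by unfold Spec_extend_sequences; infer_instance

-- ===== CLAIM (what is proved, stated in full; the proofs are below) =====
def Claim_equal_extend_sequences : Prop := ∀ (x : String), Dom_extend_sequences x → Spec_extend_sequences x (extend_sequences x)

-- ===== LEMMAS AND PROOFS =====

-- decidable facts about rotate_alphabet at one character
def rotFactsB (c : Char) : Bool :=
  (rotate_alphabet c 1 ≠ rotate_alphabet c (-1)) &&
  (rotate_alphabet c 1 ≠ rotate_alphabet c 0) &&
  (rotate_alphabet c (-1) ≠ rotate_alphabet c 0) &&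
  (rotate_alphabet c 1 ≠ c) &&
  (rotate_alphabet c (-1) ≠ c)

set_option maxRecDepth 4000 in
theorem rotFactsB_all : ∀ n : Nat, n < 128 → rotFactsB (Char.ofNat n) = true := by decide

def okC (c : Char) : Prop := c.toNat < 128

theorem rot_facts (c : Char) (h : okC c) :
    rotate_alphabet c 1 ≠ rotate_alphabet c (-1) ∧
    rotate_alphabet c 1 ≠ rotate_alphabet c 0 ∧
    rotate_alphabet c (-1) ≠ rotate_alphabet c 0 ∧
    rotate_alphabet c 1 ≠ c ∧
    rotate_alphabet c (-1) ≠ c := by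
  have h2 := rotFactsB_all c.toNat h
  rw [Char.ofNat_toNat] at h2
  unfold rotFactsB at h2
  simp only [Bool.and_eq_true, decide_eq_true_eq, ne_eq] at h2
  tauto

def okDir (d : Int) : Prop := d = 1 ∨ d = -1 ∨ d = 0

theorem pairStep_ok {p c : Char} {d : Int} (h : pairStep p c = some d) : okDir d := by
  unfold pairStep at h
  split_ifs at h <;> simp_all [okDir]

-- A's result, reformulated as recursion on the remaining input (proved equal to the fold below)
def resR : List Char → Char → Option Int → List Char
  | [], _, _ => []
  | c :: l, p, dir =>
    match dir with
    | none =>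
      match pairStep p c with
      | none => p :: resR l c none
      | some s => resR l c (some s)
    | some d =>
      if c = rotate_alphabet p d then resR l c (some d)
      else rotate_alphabet p d :: resR l c (pairStep p c)

def okOpt : Option Int → Prop
  | none => True
  | some d => okDir d

-- when cur continues the run, A's loop body keeps direction and appends nothing
theorem esStep_cont (p : Char) (hp : okC p) (d : Int) (hd : okDir d) (res : List Char) :
    esStep (some p, some d, res) (rotate_alphabet p d) = (some (rotate_alphabet p d), some d, res) := by
  obtain ⟨h12, h10, h20, h1c, h2c⟩ := rot_facts p hp
  rcases hd with rfl | rfl | rfl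
  · simp [esStep]
  · simp [esStep, Ne.symm h12]
  · by_cases hp0 : rotate_alphabet p 0 = p
    · simp [esStep, Ne.symm h1c, Ne.symm h2c, hp0]
    · simp [esStep, Ne.symm h10, Ne.symm h20, hp0]

theorem fold_resR (l : List Char) : ∀ (p : Char) (dir : Option Int) (res : List Char),
    okC p → (∀ c ∈ l, okC c) → okOpt dir →
    ((l.foldl esStep (some p, dir, res)).2.2) = res ++ resR l p dir := by
  induction l with
  | nil => intro p dir res _ _ _; simp [resR]
  | cons c l ih =>
    intro p dir res hp hl hdir
    have hc : okC c := hl c (by simp)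
    have hl' : ∀ a ∈ l, okC a := fun a ha => hl a (by simp [ha])
    rw [List.foldl_cons]
    match dir with
    | none =>
      cases hps : pairStep p c with
      | none =>
        have hcopy := hps
        unfold pairStep at hcopy
        split_ifs at hcopy with h1 h2 h3
        have hstep : esStep (some p, none, res) c = (some c, none, res ++ [p]) := by
          simp [esStep, h1, h2, h3]
        rw [hstep, ih c none (res ++ [p]) hc hl' trivial]
        simp [resR, hps]
      | some s =>
        have hcopy := hps
        unfold pairStep at hcopy
        have hstep : esStep (some p, none, res) c = (some c, some s, res) := by
          split_ifs at hcopy with h1 h2 h3 <;>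
            simp_all [esStep]
        rw [hstep, ih c (some s) res hc hl' (pairStep_ok hps)]
        simp [resR, hps]
    | some d =>
      have hd : okDir d := hdir
      by_cases hcont : c = rotate_alphabet p d
      · subst hcont
        rw [esStep_cont p hp d hd res,
          ih (rotate_alphabet p d) (some d) res hc hl' hd]
        simp [resR]
      · cases hps : pairStep p c with
        | none =>
          have hcopy := hps
          unfold pairStep at hcopy
          split_ifs at hcopy with h1 h2 h3
          have hstep : esStep (some p, some d, res) c =
              (some c, none, res ++ [rotate_alphabet p d]) := by
            simp [esStep, h1, h2, h3, hcont]
          rw [hstep, ih c none (res ++ [rotate_alphabet p d]) hc hl' trivial]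
          simp [resR, hps, hcont]
        | some s =>
          have hcopy := hps
          unfold pairStep at hcopy
          have hstep : esStep (some p, some d, res) c =
              (some c, some s, res ++ [rotate_alphabet p d]) := by
            split_ifs at hcopy with h1 h2 h3 <;>
              simp_all [esStep]
          rw [hstep, ih c (some s) (res ++ [rotate_alphabet p d]) hc hl' (pairStep_ok hps)]
          simp [resR, hps, hcont]

-- B's emit-and-continue step for a run in progress
def runOut (d : Int) (p : Char) (l : List Char) : List Char :=
  let r := runEnd d p l
  if r.2 = [] then [] else rotate_alphabet r.1 d :: altGo (r.1 :: r.2) false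

theorem main_equiv (l : List Char) : ∀ p : Char, okC p → (∀ c ∈ l, okC c) →
    (resR l p none = altGo (p :: l) true) ∧
    (∀ d : Int, okDir d → resR l p (some d) = runOut d p l) := by
  induction l with
  | nil =>
    intro p _ _
    exact ⟨by simp [resR, altGo], fun d _ => by simp [resR, runOut, runEnd]⟩
  | cons c l ih =>
    intro p hp hl
    have hc : okC c := hl c (by simp)
    have hl' : ∀ a ∈ l, okC a := fun a ha => hl a (by simp [ha])
    have ihc := ih c hc hl'
    have hbreak : ∀ fresh : Bool, altGo (p :: c :: l) fresh =
        (if fresh = true ∧ pairStep p c = none then [p] else []) ++ resR l c (pairStep p c) := by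
      intro fresh
      cases hps : pairStep p c with
      | none => simp [altGo, hps, ihc.1]
      | some s => simp [altGo, hps, ihc.2 s (pairStep_ok hps), runOut]
    constructor
    · -- fresh mode
      rw [resR]
      cases hps : pairStep p c with
      | none => rw [hbreak true, hps]; simp
      | some s => rw [hbreak true, hps]; simp
    · -- run mode
      intro d hd
      rw [resR]
      by_cases hcont : c = rotate_alphabet p d
      · rw [if_pos hcont, ihc.2 d hd]
        unfold runOut
        rw [show runEnd d p (c :: l) = runEnd d c l from by rw [runEnd, if_pos hcont]]
      · rw [if_neg hcont]
        unfold runOut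
        rw [show runEnd d p (c :: l) = (p, c :: l) from by rw [runEnd, if_neg hcont]]
        simp only [List.cons_ne_nil, reduceIte]
        rw [hbreak false]
        simp
  
theorem dom_okC {x : String} (hx : Dom_extend_sequences x) : ∀ c ∈ x.toList, okC c := by
  intro c hc
  unfold Dom_extend_sequences pvDomStr at hx
  rw [List.all_eq_true] at hx
  have := hx c hc
  unfold pvDomChar at this
  simp only [Bool.or_eq_true, Bool.and_eq_true, decide_eq_true_eq, beq_iff_eq] at this
  unfold okC
  omega

-- ===== VERDICT (by name: the statement is the Claim_ definition above) =====
theorem extend_sequences_spec : Claim_equal_extend_sequences := by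
  intro x hx
  unfold Spec_extend_sequences extend_sequences extend_sequences_alt
  have hok := dom_okC hx
  have hsp : okC ' ' := by unfold okC; decide
  cases hxl : x.toList with
  | nil => simp [esStep, altGo]
  | cons c t =>
    have hc : okC c := hok c (by simp [hxl])
    have ht : ∀ a ∈ t ++ [' '], okC a := by
      intro a ha
      rcases List.mem_append.mp ha with h | h
      · exact hok a (by simp [hxl, h])
      · simp at h; subst h; exact hsp
    have hfirst : esStep (none, none, []) c = (some c, none, []) := rfl
    rw [List.cons_append, List.foldl_cons, hfirst,
      fold_resR (t ++ [' ']) c none [] hc ht trivial,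
      (main_equiv (t ++ [' ']) c hc ht).1]
    rfl
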